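-- pv_equiv track=rewrite | github.com/seifnamous/servier-drugs-analyzer | graph-builder/graph_builder/engine/graph_builder.py | find_drugs_in_publication_title
-- ===== SOURCE A (Python) =====
-- from typing import List
--
-- def find_drugs_in_publication_title(publication_title: str, drug_names:  List[str]):
--     """_summary_
--
--     Args:
--         publication_title (str): _description_
--         drug_names (List[str]): _description_
--
--     Returns:
--         _type_: _description_
--     """
--     if not publication_title:
--         return []
--     else:
--         return [
--             drug_name.lower() for drug_name in drug_names
--             if drug_name.lower() in publication_title.lower()
--         ]
-- ===== SOURCE B (Python) =====
-- from typing import List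
--
-- def find_drugs_in_publication_title(publication_title: str, drug_names: List[str]):
--     if not publication_title:
--         return []
--     title = publication_title.lower()
--     lowered = [d.lower() for d in drug_names]
--     lengths = {len(d) for d in lowered}
--     subs = {title[i:i + L] for L in lengths for i in range(len(title) - L + 1)}
--     return [d for d in lowered if d in subs]
-- ===== Notes on version B (the rewrite author's own statement) =====
-- stated objective: faster
-- what changed: B builds a hash-set index of every title substring whose length is one some drug name has (title lowered once), then answers each lowered name by a single set lookup, instead of A's per-name substring search over the re-lowered title.
import Mathlib
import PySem

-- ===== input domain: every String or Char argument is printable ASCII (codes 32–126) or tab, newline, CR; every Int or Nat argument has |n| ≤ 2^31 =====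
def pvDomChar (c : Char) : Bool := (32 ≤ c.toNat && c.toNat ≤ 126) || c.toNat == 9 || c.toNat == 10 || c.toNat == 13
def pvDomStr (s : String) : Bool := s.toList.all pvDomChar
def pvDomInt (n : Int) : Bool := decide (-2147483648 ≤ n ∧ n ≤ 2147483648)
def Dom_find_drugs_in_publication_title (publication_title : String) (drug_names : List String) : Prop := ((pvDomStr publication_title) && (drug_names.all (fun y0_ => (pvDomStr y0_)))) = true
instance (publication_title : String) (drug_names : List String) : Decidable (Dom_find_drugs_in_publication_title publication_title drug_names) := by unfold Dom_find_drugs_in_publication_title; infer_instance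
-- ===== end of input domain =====

-- B indexes the lowered title once: it builds the set of all title substrings whose length is a
-- length some drug name has, then answers every name by one set lookup — no per-name title scan.

-- ===== PORT A =====
-- A: one comprehension, recomputing publication_title.lower() and searching the title
-- for drug_name.lower() inside the condition for every drug name.
def find_drugs_in_publication_title (publication_title : String) (drug_names : List String) : List String :=
  if publication_title = "" then []
  else
    (drug_names.filter
      (fun drug_name => PySem.Str.isIn (PySem.Str.lower drug_name) (PySem.Str.lower publication_title))).map
      (fun drug_name => PySem.Str.lower drug_name)

-- ===== PORT B =====
-- B: lower the title once; collect the set of name lengths; build the set of all title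
-- substrings of those lengths (the substring index); emit lowered names found in the index.
def find_drugs_in_publication_title_alt (publication_title : String) (drug_names : List String) : List String :=
  if publication_title = "" then []
  else
    let title := PySem.Str.lower publication_title
    let lowered := drug_names.map (fun d => PySem.Str.lower d)
    let lengths : PySem.Set Int := PySem.Set.ofList (lowered.map (fun d => (PySem.Str.len d : Int)))
    let subs : PySem.Set String := PySem.Set.ofList
      (lengths.flatMap (fun L =>
        (PySem.List.pyRange 0 ((PySem.Str.len title : Int) - L + 1) 1).map
          (fun i => PySem.Str.slice title (some i) (some (i + L)))))
    lowered.filter (fun d => PySem.Set.contains subs d)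

-- ===== PRECONDITION & SPEC =====
def Spec_find_drugs_in_publication_title (publication_title : String) (drug_names : List String) (out : List String) : Prop := out = find_drugs_in_publication_title_alt publication_title drug_names
instance (publication_title : String) (drug_names : List String) (out : List String) : Decidable (Spec_find_drugs_in_publication_title publication_title drug_names out) := by unfold Spec_find_drugs_in_publication_title; infer_instance

-- ===== CLAIM (what is proved, stated in full; the proofs are below) =====
def Claim_equal_find_drugs_in_publication_title : Prop := ∀ (publication_title : String) (drug_names : List String), Dom_find_drugs_in_publication_title publication_title drug_names → Spec_find_drugs_in_publication_title publication_title drug_names (find_drugs_in_publication_title publication_title drug_names)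

-- ===== LEMMAS AND PROOFS =====

-- A name of a listed length is in the substring index iff it is a substring of the title.
theorem pvContains_subs_iff (title : String) (lens : List Int) (d : String)
    (hpos : ∀ L ∈ lens, 0 ≤ L) (hd : (d.toList.length : Int) ∈ lens) :
    PySem.Set.contains
      (PySem.Set.ofList
        ((PySem.Set.ofList lens).flatMap (fun L =>
          (PySem.List.pyRange 0 ((PySem.Str.len title : Int) - L + 1) 1).map
            (fun i => PySem.Str.slice title (some i) (some (i + L)))))) d
      = PySem.Str.isIn d title := by
  rw [Bool.eq_iff_iff, PySem.Set.contains_iff, PySem.Set.mem_ofList, List.mem_flatMap,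
    PySem.Str.isIn_iff_infix]
  constructor
  · rintro ⟨L, hL, hmem⟩
    rw [List.mem_map] at hmem
    obtain ⟨i, hi, hslice⟩ := hmem
    rw [PySem.List.mem_pyRange_one] at hi
    have hL0 : 0 ≤ L := hpos L ((PySem.Set.mem_ofList lens L).mp hL)
    have h0i : 0 ≤ i := hi.1
    have hdt : d.toList = (title.toList.drop i.toNat).take ((i + L).toNat - i.toNat) := by
      rw [← hslice]
      rw [PySem.Str.toList_slice, PySem.Chars.slice_eq_listSlice, PySem.List.slice_toNat _ h0i (by omega)]
    rw [hdt]
    exact (List.take_prefix _ _).isInfix.trans (List.drop_suffix _ _).isInfix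
  · rintro ⟨u, v, huv⟩
    refine ⟨(d.toList.length : Int), (PySem.Set.mem_ofList lens _).mpr hd, ?_⟩
    rw [List.mem_map]
    refine ⟨(u.length : Int), ?_, ?_⟩
    · rw [PySem.List.mem_pyRange_one]
      have := congrArg List.length huv
      simp at this
      constructor
      · omega
      · simp [PySem.Str.len_eq]; omega
    · apply String.toList_inj.mp
      rw [PySem.Str.toList_slice]
      rw [show ((u.length : Int) + (d.toList.length : Int)) = ((u.length + d.toList.length : Nat) : Int) by push_cast; ring]
      rw [PySem.Chars.slice_eq_listSlice, PySem.List.slice_natCast]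
      rw [← huv]
      simp

-- ===== VERDICT (by name: the statement is the Claim_ definition above) =====
theorem find_drugs_in_publication_title_spec : Claim_equal_find_drugs_in_publication_title := by
  intro publication_title drug_names _
  unfold Spec_find_drugs_in_publication_title
  unfold find_drugs_in_publication_title find_drugs_in_publication_title_alt
  by_cases h : publication_title = ""
  · simp [h]
  · simp only [h, ite_false]
    symm
    calc (drug_names.map (fun d => PySem.Str.lower d)).filter
          (fun d => PySem.Set.contains
            (PySem.Set.ofList
              ((PySem.Set.ofList ((drug_names.map (fun d => PySem.Str.lower d)).map (fun d => (PySem.Str.len d : Int)))).flatMap (fun L =>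
                (PySem.List.pyRange 0 ((PySem.Str.len (PySem.Str.lower publication_title) : Int) - L + 1) 1).map
                  (fun i => PySem.Str.slice (PySem.Str.lower publication_title) (some i) (some (i + L)))))) d)
        = (drug_names.map (fun d => PySem.Str.lower d)).filter
            (fun d => PySem.Str.isIn d (PySem.Str.lower publication_title)) := by
          apply List.filter_congr
          intro x hx
          apply pvContains_subs_iff
          · intro L hL
            simp only [List.mem_map] at hL
            obtain ⟨y, _, rfl⟩ := hL
            exact Int.natCast_nonneg _
          · simpa only [PySem.Str.len_eq] using List.mem_map_of_mem (f := fun d => ((PySem.Str.len d : Int))) hx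
      _ = (drug_names.filter
            ((fun d => PySem.Str.isIn d (PySem.Str.lower publication_title)) ∘
              (fun d => PySem.Str.lower d))).map
            (fun d => PySem.Str.lower d) := List.filter_map
      _ = (drug_names.filter
            (fun drug_name => PySem.Str.isIn (PySem.Str.lower drug_name) (PySem.Str.lower publication_title))).map
            (fun drug_name => PySem.Str.lower drug_name) := rfl
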